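-- pv_equiv track=rewrite | github.com/cjuniordev/programming-functional | EPs/EP2/2021101100.py | tabuleiroVazio
-- ===== SOURCE A (Python) =====
-- def tabuleiroVazio(tabuleiro, i=0):
--     """
--     Verifica se o tabuleiro está vazio e retorna True ou False
--     """
--     if i < len(tabuleiro):
--         if tabuleiro[i] == ' ':
--             return tabuleiroVazio(tabuleiro, i+1)
--         else:
--             return False
--     else:
--         return True
-- ===== SOURCE B (Python) =====
-- def tabuleiroVazio(tabuleiro, i=0):
--     """
--     Verifica se o tabuleiro está vazio e retorna True ou False
--     """
--     return all(tabuleiro[j] == ' ' for j in range(i, len(tabuleiro)))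
-- ===== Notes on version B (the rewrite author's own statement) =====
-- stated objective: idiomatic
-- what changed: The recursion is replaced by a single iterative all() scan over range(i, len(tabuleiro)), maintaining only the running truth of the check.
import Mathlib
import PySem

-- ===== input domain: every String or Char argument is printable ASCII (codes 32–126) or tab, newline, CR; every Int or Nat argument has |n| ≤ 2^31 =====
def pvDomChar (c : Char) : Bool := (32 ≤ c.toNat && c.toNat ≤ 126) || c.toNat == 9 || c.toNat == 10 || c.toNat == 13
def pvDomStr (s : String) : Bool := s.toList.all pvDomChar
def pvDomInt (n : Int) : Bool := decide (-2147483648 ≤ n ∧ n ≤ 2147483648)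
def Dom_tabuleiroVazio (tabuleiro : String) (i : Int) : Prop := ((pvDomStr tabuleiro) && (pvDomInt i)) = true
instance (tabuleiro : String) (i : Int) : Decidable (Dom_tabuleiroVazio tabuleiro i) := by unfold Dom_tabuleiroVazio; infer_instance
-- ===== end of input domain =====

-- B replaces A's recursion with a single iterative all-scan over range(i, len); objective: idiomatic.


-- ===== PORT A =====
def tabuleiroVazio (tabuleiro : String) (i : Int) : Bool :=
  if _h : i < PySem.Str.len tabuleiro then
    match PySem.Str.pyGet? tabuleiro i with
    | some c => if c = ' ' then tabuleiroVazio tabuleiro (i + 1) else false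
    | none => false   -- IndexError in Python; excluded by Pre_
  else true
termination_by (PySem.Str.len tabuleiro - i).toNat
decreasing_by simp only [PySem.Str.len_eq] at *; omega

-- ===== PORT B =====
def tabuleiroVazio_alt (tabuleiro : String) (i : Int) : Bool :=
  (PySem.List.pyRange i (PySem.Str.len tabuleiro) 1).all
    (fun j => PySem.Str.pyGet? tabuleiro j == some ' ')

-- ===== PRECONDITION & SPEC =====
-- Pre_ excludes exactly the inputs where Python A raises IndexError: i < -len(tabuleiro).
def Pre_tabuleiroVazio (tabuleiro : String) (i : Int) : Prop :=
  -(PySem.Str.len tabuleiro) ≤ i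
instance (tabuleiro : String) (i : Int) : Decidable (Pre_tabuleiroVazio tabuleiro i) := by
  unfold Pre_tabuleiroVazio; infer_instance
def pvWitness_tabuleiroVazio : String × Int := ("  ", 0)

def Spec_tabuleiroVazio (tabuleiro : String) (i : Int) (out : Bool) : Prop := out = tabuleiroVazio_alt tabuleiro i
instance (tabuleiro : String) (i : Int) (out : Bool) : Decidable (Spec_tabuleiroVazio tabuleiro i out) := by unfold Spec_tabuleiroVazio; infer_instance

-- ===== CLAIM (what is proved, stated in full; the proofs are below) =====
def Claim_equal_tabuleiroVazio : Prop := ∀ (tabuleiro : String) (i : Int), Dom_tabuleiroVazio tabuleiro i → Pre_tabuleiroVazio tabuleiro i → Spec_tabuleiroVazio tabuleiro i (tabuleiroVazio tabuleiro i)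

-- ===== LEMMAS AND PROOFS =====
lemma tabuleiroVazio_key (tabuleiro : String) :
    ∀ (n : Nat) (i : Int), (PySem.Str.len tabuleiro - i).toNat ≤ n →
      -(PySem.Str.len tabuleiro) ≤ i →
      tabuleiroVazio tabuleiro i = tabuleiroVazio_alt tabuleiro i := by
  intro n
  induction n with
  | zero =>
    intro i hn hp
    have hge : ¬ i < PySem.Str.len tabuleiro := by omega
    rw [tabuleiroVazio, dif_neg hge, tabuleiroVazio_alt,
      PySem.List.pyRange_one_eq_nil (by omega)]
    rfl
  | succ n ih =>
    intro i hn hp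
    by_cases h : i < PySem.Str.len tabuleiro
    · have hL := PySem.Str.len_eq tabuleiro
      have hsome : PySem.List.pyGet? tabuleiro.toList i ≠ none := by
        intro hnone
        exact ((PySem.List.pyGet?_eq_none_iff _ _).mp hnone) ⟨by omega, by omega⟩
      obtain ⟨c, hc⟩ := Option.ne_none_iff_exists'.mp hsome
      have hc' : PySem.Str.pyGet? tabuleiro i = some c := by
        simpa [PySem.Str.pyGet?_eq, PySem.Chars.pyGet?] using hc
      have hrec := ih (i + 1) (by omega) (by omega)
      rw [tabuleiroVazio, dif_pos h, hc', tabuleiroVazio_alt,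
        PySem.List.pyRange_one_cons h, List.all_cons]
      by_cases hsp : c = ' '
      · simp [hsp, hc, hrec, tabuleiroVazio_alt, PySem.Str.pyGet?_eq, PySem.Chars.pyGet?]
      · simp [hsp, hc, PySem.Str.pyGet?_eq, PySem.Chars.pyGet?]
    · rw [tabuleiroVazio, dif_neg h, tabuleiroVazio_alt,
        PySem.List.pyRange_one_eq_nil (by omega)]
      rfl

-- ===== VERDICT (by name: the statement is the Claim_ definition above) =====
theorem tabuleiroVazio_spec : Claim_equal_tabuleiroVazio := by
  intro tabuleiro i _ hp
  exact tabuleiroVazio_key tabuleiro (PySem.Str.len tabuleiro - i).toNat i le_rfl hp
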